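-- pv_equiv track=rewrite | github.com/taowangcheng/MalGenieDemo | preprocess/short_text.py | check_single_char
-- ===== SOURCE A (Python) =====
-- def check_single_char(word: str):
--     flag = 1
--     flag1 = 0
--     for index, letter in enumerate(word):
--         if flag1 == 0:
--             if letter.isalpha():
--                 flag1 = 1
--             else:
--                 flag = 0
--                 break
--         else:
--             if letter == '-':
--                 flag1 = 0
--             else:
--                 flag = 0
--                 break
--     if flag == 0:
--         return False
--     else:
--         return True
-- ===== SOURCE B (Python) =====
-- def check_single_char(word: str):
--     evens = word[::2]
--     odds = word[1::2]
--     return all(c.isalpha() for c in evens) and all(c == '-' for c in odds)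
-- ===== Notes on version B (the rewrite author's own statement) =====
-- stated objective: simpler
-- what changed: Replaces the flag/flag1 state machine with a break by two independent slice checks: every even-index character is alphabetic and every odd-index character is a dash.
import Mathlib
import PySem

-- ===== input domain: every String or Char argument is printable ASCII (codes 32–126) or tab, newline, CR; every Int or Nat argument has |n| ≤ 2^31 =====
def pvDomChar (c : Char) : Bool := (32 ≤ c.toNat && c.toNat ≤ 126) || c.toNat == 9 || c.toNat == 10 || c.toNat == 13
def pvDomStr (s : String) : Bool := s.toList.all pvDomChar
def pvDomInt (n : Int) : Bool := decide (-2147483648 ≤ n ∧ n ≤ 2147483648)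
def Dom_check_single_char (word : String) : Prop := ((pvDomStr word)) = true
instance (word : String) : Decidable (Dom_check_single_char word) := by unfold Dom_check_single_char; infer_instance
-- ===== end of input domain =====

-- B replaces A's flag/flag1 state machine (with break) by two independent checks
-- on the even- and odd-index slices of the word; objective: simpler.


-- ===== PORT A =====
-- the for-loop over enumerate(word): state (flag, flag1); an early 'break' returns immediately
def pvCheckLoop : List (Int × Char) → Int → Int → Int × Int
  | [], flag, flag1 => (flag, flag1)
  | (_, letter) :: rest, flag, flag1 =>
    if flag1 == 0 then
      if PySem.Str.isalpha letter then pvCheckLoop rest flag 1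
      else (0, flag1)
    else
      if letter == '-' then pvCheckLoop rest flag 0
      else (0, flag1)

def check_single_char (word : String) : Bool :=
  let r := pvCheckLoop (PySem.List.enumerate word.toList 0) 1 0
  if r.1 == 0 then false else true

-- ===== PORT B =====
-- Source B: evens = word[::2]; odds = word[1::2]; all alpha on evens and all dash on odds
def check_single_char_alt (word : String) : Bool :=
  let evens := (PySem.List.slice? word.toList none none 2).getD []
  let odds := (PySem.List.slice? word.toList (some 1) none 2).getD []
  evens.all (fun c => PySem.Str.isalpha c) && odds.all (fun c => c == '-')

-- ===== PRECONDITION & SPEC =====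
def Spec_check_single_char (word : String) (out : Bool) : Prop := out = check_single_char_alt word
instance (word : String) (out : Bool) : Decidable (Spec_check_single_char word out) := by unfold Spec_check_single_char; infer_instance

-- ===== CLAIM (what is proved, stated in full; the proofs are below) =====
def Claim_equal_check_single_char : Prop := ∀ (word : String), Dom_check_single_char word → Spec_check_single_char word (check_single_char word)

-- ===== LEMMAS AND PROOFS =====

-- the even-index elements of a list
def pvEvens {α : Type} : List α → List α
  | [] => []
  | [a] => [a]
  | a :: _ :: t => a :: pvEvens t

theorem pvEvens_cons {α : Type} (b : α) (t : List α) :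
    pvEvens (b :: t) = b :: pvEvens t.tail := by
  cases t <;> rfl

theorem pvEvens_range {α : Type} (l : List α) :
    (List.range ((l.length + 1) / 2)).filterMap (fun k => l[2 * k]?) = pvEvens l := by
  induction l using pvEvens.induct with
  | case1 => simp [pvEvens]
  | case2 a => simp [pvEvens]
  | case3 a b t ih =>
      have hlen : (t.length + 2 + 1) / 2 = (t.length + 1) / 2 + 1 := by omega
      simp only [List.length_cons, hlen, List.range_succ_eq_map, List.filterMap_cons,
        List.filterMap_map]
      simp [pvEvens, Function.comp, Nat.mul_add, ← ih]

theorem pvSlice_evens {α : Type} (l : List α) :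
    PySem.List.slice? l none none 2 = some (pvEvens l) := by
  rw [← pvEvens_range]
  simp only [PySem.List.slice?, PySem.List.sliceIndices]
  norm_num
  have h1 : (if 0 < l.length then (((l.length : Int) + 2 - 1) / 2).toNat else 0)
      = (l.length + 1) / 2 := by split <;> omega
  have h2 : ∀ x : Nat, ((2 * (x : Int)).toNat) = 2 * x := by intro x; omega
  rw [h1]
  simp [h2]

theorem pvSlice_odds {α : Type} (l : List α) :
    PySem.List.slice? l (some 1) none 2 = some (pvEvens l.tail) := by
  cases l with
  | nil => rfl
  | cons a t =>
      simp only [PySem.List.slice?, PySem.List.sliceIndices]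
      norm_num
      have h1 : (if 0 < t.length then (((t.length : Int) + 2 - 1) / 2).toNat else 0)
          = (t.length + 1) / 2 := by split <;> omega
      have h2 : ∀ x : Nat, ((1 + 2 * (x : Int)).toNat) = 1 + 2 * x := by intro x; omega
      have h3 : ∀ x : Nat, (a :: t)[(1 + 2 * (x : Int)).toNat]? = t[2 * x]? := by
        intro x; rw [h2]; simp [List.getElem?_cons]
      rw [h1]
      simp only [h3]
      exact pvEvens_range t

theorem pvLoop_key (l : List Char) (s : Int) :
    ((pvCheckLoop (PySem.List.enumerate l s) 1 0).1 == 0)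
      = !((pvEvens l).all (fun c => PySem.Str.isalpha c)
          && (pvEvens l.tail).all (fun c => c == '-')) := by
  induction l using pvEvens.induct generalizing s with
  | case1 => simp [pvCheckLoop, pvEvens, PySem.List.enumerate_nil]
  | case2 a =>
      by_cases h : PySem.Str.isalpha a <;>
        simp [pvCheckLoop, pvEvens, PySem.List.enumerate_cons, PySem.List.enumerate_nil, h]
  | case3 a b t ih =>
      by_cases ha : PySem.Str.isalpha a <;> by_cases hb : b = '-' <;>
        simp [pvCheckLoop, pvEvens, pvEvens_cons, PySem.List.enumerate_cons, ha, hb, ih]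

-- ===== VERDICT (by name: the statement is the Claim_ definition above) =====
theorem check_single_char_spec : Claim_equal_check_single_char := by
  intro word _
  unfold Spec_check_single_char check_single_char check_single_char_alt
  simp only [pvSlice_evens, pvSlice_odds, Option.getD_some]
  rw [show (if (pvCheckLoop (PySem.List.enumerate word.toList 0) 1 0).1 == 0 then false else true)
        = !((pvCheckLoop (PySem.List.enumerate word.toList 0) 1 0).1 == 0) by
      cases h : ((pvCheckLoop (PySem.List.enumerate word.toList 0) 1 0).1 == 0) <;> simp]
  rw [pvLoop_key]
  simp
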